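-- pv_equiv track=rewrite | github.com/stephendwillson/ProjectEuler | lib/euler_lib.py | get_recurring_decimal_cycle
-- ===== SOURCE A (Python) =====
-- def get_recurring_decimal_cycle(numerator, denominator):
--     """
--     Find recurring cycle in the decimal for 'numerator / denominator' if
--     one exists.
--
--     :type numerator: int
--     :type denominator: int
--     :return: Numeric cycle if one exists
--     :rtype: int, None
--     """
--
--     repeat = ""
--
--     # remainder dictionary --> {remainder : position}
--     rem_dict = {}
--
--     # if remainder ever hits 0, there's no cycle
--     remainder = numerator % denominator
--     while (remainder != 0 and remainder not in rem_dict):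
--
--         rem_dict[remainder] = len(repeat)
--
--         remainder *= 10
--         repeat += str(remainder // denominator)
--
--         remainder %= denominator
--
--     if remainder == 0:
--         return None
--
--     return repeat[rem_dict[remainder]:]
-- ===== SOURCE B (Python) =====
-- def get_recurring_decimal_cycle(numerator, denominator):
--     # Floyd tortoise-and-hare on the remainder map r -> r*10 % denominator,
--     # then cycle length, cycle start, and regeneration of exactly the cycle digits:
--     # O(1) extra memory instead of A's remainder-position dict + string slice.
--     r0 = numerator % denominator
--     slow = r0 * 10 % denominator
--     fast = slow * 10 % denominator
--     while slow != fast: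
--         slow = slow * 10 % denominator
--         fast = fast * 10 % denominator * 10 % denominator
--     if slow == 0:
--         return None
--     # cycle length lam: steps needed to return to the meeting point
--     lam, t = 1, slow * 10 % denominator
--     while t != slow:
--         t = t * 10 % denominator
--         lam += 1
--     # cycle start: first remainder that repeats, found with two pointers lam apart
--     a, b = r0, r0
--     for _ in range(lam):
--         b = b * 10 % denominator
--     while a != b:
--         a = a * 10 % denominator
--         b = b * 10 % denominator
--     # regenerate exactly the cycle digits
--     out = []
--     for _ in range(lam):
--         out.append(str(a * 10 // denominator))
--         a = a * 10 % denominator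
--     return "".join(out)
-- ===== Notes on version B (the rewrite author's own statement) =====
-- stated objective: alternative
-- what changed: Replaces A's remainder-position dict plus string slicing with Floyd's tortoise-and-hare pointer chasing on the remainder map r -> r*10 % denominator: find a meeting point inside the cycle, measure the cycle length, locate the cycle start with two pointers, then regenerate exactly the cycle digits, using O(1) extra memory instead of A's O(cycle) dict and digit string.
import Mathlib
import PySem

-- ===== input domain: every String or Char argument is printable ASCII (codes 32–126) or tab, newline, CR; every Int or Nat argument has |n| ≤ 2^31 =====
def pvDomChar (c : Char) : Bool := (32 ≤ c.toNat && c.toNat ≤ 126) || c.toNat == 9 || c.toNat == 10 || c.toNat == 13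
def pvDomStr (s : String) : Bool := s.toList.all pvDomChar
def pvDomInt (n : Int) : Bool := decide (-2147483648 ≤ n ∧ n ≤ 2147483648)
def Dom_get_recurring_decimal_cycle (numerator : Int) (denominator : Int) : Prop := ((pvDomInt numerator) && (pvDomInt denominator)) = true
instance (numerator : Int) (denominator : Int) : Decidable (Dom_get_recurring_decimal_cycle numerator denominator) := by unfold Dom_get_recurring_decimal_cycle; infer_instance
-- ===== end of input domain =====

-- B replaces A's remainder-position dict and string slice by Floyd's tortoise-and-hare on the
-- remainder map (meeting point, cycle length, cycle start, regenerate the cycle digits):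
-- an alternative algorithm with O(1) extra memory during cycle detection.


-- ===== PORT A =====
-- the while loop of A, fuel-based (fuel |den|+1 always suffices, proved below)
def pvAloop (den : Int) : Nat → String → PySem.Dict Int Int → Int → Option String
  | 0, _, _, _ => none
  | fuel+1, rep, dict, r =>
    if r ≠ 0 ∧ dict.contains r = false then
      let dict' := dict.insert r (PySem.Str.len rep)
      let r' := r * 10
      let rep' := rep ++ PySem.Int.toStr (PySem.Int.floordiv r' den)
      pvAloop den fuel rep' dict' (PySem.Int.mod r' den)
    else if r = 0 then none
    else some (PySem.Str.slice rep (some (dict.getD r 0)) none)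

def get_recurring_decimal_cycle (numerator : Int) (denominator : Int) : Option String :=
  pvAloop denominator (denominator.natAbs + 1) "" PySem.Dict.empty (PySem.Int.mod numerator denominator)

-- ===== PORT B =====
-- Floyd's tortoise and hare: while slow != fast, slow advances one step, fast two
def pvBfl (den : Int) : Nat → Int → Int → Int
  | 0, slow, _ => slow
  | fuel+1, slow, fast =>
    if slow = fast then slow
    else pvBfl den fuel (PySem.Int.mod (slow * 10) den)
      (PySem.Int.mod ((PySem.Int.mod (fast * 10) den) * 10) den)

-- while t != s: count steps back to s (cycle length)
def pvBlam (den s : Int) : Nat → Int → Int → Int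
  | 0, _, lam => lam
  | fuel+1, t, lam =>
    if t = s then lam else pvBlam den s fuel (PySem.Int.mod (t * 10) den) (lam + 1)

-- while a != b: advance both pointers (cycle start)
def pvBmu (den : Int) : Nat → Int → Int → Int
  | 0, a, _ => a
  | fuel+1, a, b =>
    if a = b then a else pvBmu den fuel (PySem.Int.mod (a * 10) den) (PySem.Int.mod (b * 10) den)

def get_recurring_decimal_cycle_alt (numerator : Int) (denominator : Int) : Option String :=
  let r0 := PySem.Int.mod numerator denominator
  let slow := PySem.Int.mod (r0 * 10) denominator
  let fast := PySem.Int.mod (slow * 10) denominator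
  let s := pvBfl denominator denominator.natAbs slow fast
  if s = 0 then none
  else
    let lam := pvBlam denominator s denominator.natAbs (PySem.Int.mod (s * 10) denominator) 1
    let b0 := (List.range lam.toNat).foldl (fun r _ => PySem.Int.mod (r * 10) denominator) r0
    let a := pvBmu denominator denominator.natAbs r0 b0
    let st := (List.range lam.toNat).foldl
      (fun (st : List String × Int) _ =>
        (st.1 ++ [PySem.Int.toStr (PySem.Int.floordiv (st.2 * 10) denominator)],
         PySem.Int.mod (st.2 * 10) denominator))
      ([], a)
    some (PySem.Str.join "" st.1)

-- ===== PRECONDITION & SPEC =====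
-- Pre_ excludes exactly denominator = 0, where the Python A raises ZeroDivisionError.
def Pre_get_recurring_decimal_cycle (numerator : Int) (denominator : Int) : Prop := denominator ≠ 0
instance (numerator : Int) (denominator : Int) : Decidable (Pre_get_recurring_decimal_cycle numerator denominator) := by unfold Pre_get_recurring_decimal_cycle; infer_instance
def pvWitness_get_recurring_decimal_cycle : Int × Int := (1, 7)

def Spec_get_recurring_decimal_cycle (numerator : Int) (denominator : Int) (out : Option String) : Prop := out = get_recurring_decimal_cycle_alt numerator denominator
instance (numerator : Int) (denominator : Int) (out : Option String) : Decidable (Spec_get_recurring_decimal_cycle numerator denominator out) := by unfold Spec_get_recurring_decimal_cycle; infer_instance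

-- ===== CLAIM (what is proved, stated in full; the proofs are below) =====
def Claim_equal_get_recurring_decimal_cycle : Prop := ∀ (numerator : Int) (denominator : Int), Dom_get_recurring_decimal_cycle numerator denominator → Pre_get_recurring_decimal_cycle numerator denominator → Spec_get_recurring_decimal_cycle numerator denominator (get_recurring_decimal_cycle numerator denominator)

-- ===== LEMMAS AND PROOFS =====

-- proof-side helpers: the remainder sequence of the long division
def pvStep (d r : Int) : Int := PySem.Int.mod (r * 10) d

def pvSeq (n d : Int) : Nat → Int
  | 0 => PySem.Int.mod n d
  | i+1 => pvStep d (pvSeq n d i)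

-- the digit emitted at step t, as a character list
def pvDigC (n d : Int) (t : Nat) : List Char :=
  PySem.Int.toChars (PySem.Int.floordiv (pvSeq n d t * 10) d)

-- "the loop of A stops at t": remainder zero or seen before
def pvP (n d : Int) (t : Nat) : Prop :=
  pvSeq n d t = 0 ∨ ∃ s, s < t ∧ pvSeq n d s = pvSeq n d t

theorem pv_exists_least {P : ℕ → Prop} (h : ∃ n, P n) : ∃ n, P n ∧ ∀ m, m < n → ¬ P m := by
  obtain ⟨n, hn⟩ := h
  induction n using Nat.strong_induction_on with
  | _ n ih =>
    by_cases h' : ∃ m, m < n ∧ P m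
    · obtain ⟨m, hm, hPm⟩ := h'
      exact ih m hm hPm
    · exact ⟨n, hn, fun m hm hPm => h' ⟨m, hm, hPm⟩⟩

theorem pvMod_sign (a d : Int) (hd : d ≠ 0) :
    (PySem.Int.mod a d).natAbs < d.natAbs ∧ (0 < d → 0 ≤ PySem.Int.mod a d) ∧
      (d < 0 → PySem.Int.mod a d ≤ 0) := by
  rcases lt_or_gt_of_ne hd with hneg | hpos
  · have h1 : PySem.Int.mod a d = - PySem.Int.mod (-a) (-d) := by
      have := PySem.Int.mod_neg_neg (-a) (-d)
      simpa using this.symm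
    have hpos' : (0:Int) < -d := by omega
    have h2 := PySem.Int.mod_eq_emod_of_pos (a := -a) hpos'
    have h3 : 0 ≤ (-a) % (-d) := Int.emod_nonneg (-a) (by omega)
    have h4 : (-a) % (-d) < -d := Int.emod_lt_of_pos (-a) hpos'
    rw [h1, h2]
    refine ⟨by omega, by omega, by omega⟩
  · have h2 := PySem.Int.mod_eq_emod_of_pos (a := a) hpos
    have h3 : 0 ≤ a % d := Int.emod_nonneg a (by omega)
    have h4 : a % d < d := Int.emod_lt_of_pos a hpos
    rw [h2]
    refine ⟨by omega, by omega, by omega⟩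

theorem pvSeq_sign (n d : Int) (hd : d ≠ 0) (i : Nat) :
    (pvSeq n d i).natAbs < d.natAbs ∧ (0 < d → 0 ≤ pvSeq n d i) ∧
      (d < 0 → pvSeq n d i ≤ 0) := by
  cases i with
  | zero => exact pvMod_sign n d hd
  | succ i => exact pvMod_sign (pvSeq n d i * 10) d hd

theorem pvSeq_inj_abs (n d : Int) (hd : d ≠ 0) {i j : Nat}
    (h : (pvSeq n d i).natAbs = (pvSeq n d j).natAbs) : pvSeq n d i = pvSeq n d j := by
  have hi := pvSeq_sign n d hd i
  have hj := pvSeq_sign n d hd j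
  rcases lt_or_gt_of_ne hd with hneg | hpos <;> omega

theorem pvStep_zero (d : Int) : pvStep d 0 = 0 := by
  simp [pvStep, PySem.Int.mod]

theorem pvP_exists (n d : Int) (hd : d ≠ 0) : ∃ t, pvP n d t := by
  by_contra h
  have hnz : ∀ t, pvSeq n d t ≠ 0 := fun t ht => h ⟨t, Or.inl ht⟩
  have hinj : ∀ s t : Nat, s < t → pvSeq n d s ≠ pvSeq n d t := fun s t hst he =>
    h ⟨t, Or.inr ⟨s, hst, he⟩⟩
  set N := d.natAbs with hN
  have hN1 : 1 ≤ N := by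
    have : d.natAbs ≠ 0 := Int.natAbs_ne_zero.mpr hd
    omega
  have hmaps : Set.MapsTo (fun t => (pvSeq n d t).natAbs) ↑(Finset.range (N + 1))
      ↑(Finset.Icc 1 (N - 1)) := by
    intro t _
    have h1 := pvSeq_sign n d hd t
    have h2 : (pvSeq n d t).natAbs ≠ 0 := Int.natAbs_ne_zero.mpr (hnz t)
    simp only [Finset.coe_Icc, Set.mem_Icc]
    omega
  have hcard : (Finset.Icc 1 (N - 1)).card < (Finset.range (N + 1)).card := by
    rw [Nat.card_Icc, Finset.card_range]
    omega
  obtain ⟨x, hx, y, hy, hxy, hfeq⟩ := Finset.exists_ne_map_eq_of_card_lt_of_maps_to hcard hmaps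
  have : pvSeq n d x = pvSeq n d y := pvSeq_inj_abs n d hd hfeq
  rcases Nat.lt_or_ge x y with hlt | hge
  · exact hinj x y hlt this
  · exact hinj y x (by omega) this.symm

theorem pvDig_bound (n d : Int) (hd : d ≠ 0) (t : Nat) :
    0 ≤ PySem.Int.floordiv (pvSeq n d t * 10) d ∧ PySem.Int.floordiv (pvSeq n d t * 10) d < 10 := by
  have hs := pvSeq_sign n d hd t
  set r := pvSeq n d t with hr
  have key : ∀ (r' d' : Int), 0 < d' → 0 ≤ r' → r' < d' →
      0 ≤ PySem.Int.floordiv (r' * 10) d' ∧ PySem.Int.floordiv (r' * 10) d' < 10 := by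
    intro r' d' hd' hr0 hrd
    rw [PySem.Int.floordiv_eq_ediv_of_pos hd']
    constructor
    · exact Int.ediv_nonneg (by nlinarith) (by omega)
    · rw [Int.ediv_lt_iff_lt_mul hd']
      nlinarith
  rcases lt_or_gt_of_ne hd with hneg | hpos
  · have h1 : PySem.Int.floordiv (r * 10) d = PySem.Int.floordiv ((-r) * 10) (-d) := by
      have := PySem.Int.floordiv_neg_neg (r * 10) d
      calc PySem.Int.floordiv (r * 10) d = PySem.Int.floordiv (-(r * 10)) (-d) := this.symm
        _ = PySem.Int.floordiv ((-r) * 10) (-d) := by ring_nf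
    rw [h1]
    exact key (-r) (-d) (by omega) (by omega) (by omega)
  · exact key r d hpos (hs.2.1 hpos) (by omega)

theorem pvDigC_len (n d : Int) (hd : d ≠ 0) (t : Nat) : (pvDigC n d t).length = 1 := by
  have h := pvDig_bound n d hd t
  unfold pvDigC
  set x := PySem.Int.floordiv (pvSeq n d t * 10) d with hx
  clear_value x
  obtain ⟨h1, h2⟩ := h
  interval_cases x <;> decide

theorem pv_k_lt (n d : Int) (hd : d ≠ 0) (k : Nat) (hk : pvP n d k)
    (hmin : ∀ m, m < k → ¬ pvP n d m) : k < d.natAbs := by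
  set N := d.natAbs with hN
  have hN1 : 1 ≤ N := by
    have : d.natAbs ≠ 0 := Int.natAbs_ne_zero.mpr hd
    omega
  have hmaps : Set.MapsTo (fun t => (pvSeq n d t).natAbs) ↑(Finset.range k)
      ↑(Finset.Icc 1 (N - 1)) := by
    intro t ht
    simp only [Finset.coe_range, Set.mem_Iio] at ht
    have h1 := pvSeq_sign n d hd t
    have hnz : pvSeq n d t ≠ 0 := fun h0 => hmin t ht (Or.inl h0)
    have h2 : (pvSeq n d t).natAbs ≠ 0 := Int.natAbs_ne_zero.mpr hnz
    simp only [Finset.coe_Icc, Set.mem_Icc]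
    omega
  have hinj : Set.InjOn (fun t => (pvSeq n d t).natAbs) ↑(Finset.range k) := by
    intro a ha b hb hab
    simp only [Finset.coe_range, Set.mem_Iio] at ha hb
    have heq : pvSeq n d a = pvSeq n d b := pvSeq_inj_abs n d hd hab
    by_contra hne
    rcases Nat.lt_or_ge a b with hlt | hge
    · exact hmin b hb (Or.inr ⟨a, hlt, heq⟩)
    · exact hmin a ha (Or.inr ⟨b, by omega, heq.symm⟩)
  have := Finset.card_le_card_of_injOn _ hmaps hinj
  rw [Nat.card_Icc, Finset.card_range] at this
  omega

theorem pvSeq_zero_after (n d : Int) (k : Nat) (hz : pvSeq n d k = 0) :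
    ∀ t, k ≤ t → pvSeq n d t = 0 := by
  intro t ht
  induction t with
  | zero => exact Nat.le_zero.mp ht ▸ hz
  | succ t ih =>
    rcases Nat.lt_or_ge k (t + 1) with hlt | hge
    · have h0 : pvSeq n d t = 0 := ih (by omega)
      show pvStep d (pvSeq n d t) = 0
      rw [h0, pvStep_zero]
    · have : k = t + 1 := by omega
      exact this ▸ hz

theorem pv_foldl (n d : Int) (m i : Nat) :
    (List.range m).foldl (fun r _ => PySem.Int.mod (r * 10) d) (pvSeq n d i) = pvSeq n d (i + m) := by
  induction m with
  | zero => rfl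
  | succ m ih =>
    rw [List.range_succ, List.foldl_append, ih]
    rfl

-- periodicity with period p = k - j once pvSeq j = pvSeq k, j < k
theorem pv_per (n d : Int) (k j : Nat) (hj : j < k) (hjv : pvSeq n d j = pvSeq n d k) :
    ∀ t, j ≤ t → pvSeq n d (t + (k - j)) = pvSeq n d t := by
  intro t ht
  induction t, ht using Nat.le_induction with
  | base =>
    have : j + (k - j) = k := by omega
    rw [this, hjv]
  | succ t ht ih =>
    have h1 : t + 1 + (k - j) = (t + (k - j)) + 1 := by omega
    rw [h1]
    show pvStep d (pvSeq n d (t + (k - j))) = pvStep d (pvSeq n d t)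
    rw [ih]

theorem pv_red (n d : Int) (k j : Nat) (hj : j < k) (hjv : pvSeq n d j = pvSeq n d k) :
    ∀ t, j ≤ t → pvSeq n d t = pvSeq n d (j + (t - j) % (k - j)) := by
  have hp : 0 < k - j := by omega
  intro t ht
  generalize hm : t - j = m
  have htm : t = j + m := by omega
  subst htm
  clear ht hm
  induction m using Nat.strong_induction_on with
  | _ m ih =>
    rcases Nat.lt_or_ge m (k - j) with hlt | hge
    · rw [Nat.mod_eq_of_lt hlt]
    · have h1 : j + m = (j + (m - (k - j))) + (k - j) := by omega
      rw [h1, pv_per n d k j hj hjv _ (by omega)]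
      have h2 := ih (m - (k - j)) (by omega)
      rw [h2]
      congr 2
      conv_rhs => rw [show m = (m - (k - j)) + (k - j) by omega]
      rw [Nat.add_mod_right]

theorem pvFlat_len (n d : Int) (hd : d ≠ 0) : ∀ (m a : Nat),
    ((List.range' a m).flatMap (pvDigC n d)).length = m := by
  intro m
  induction m with
  | zero => intro a; rfl
  | succ m ih =>
    intro a
    rw [List.range'_succ]
    simp only [List.flatMap_cons, List.length_append]
    rw [pvDigC_len n d hd a, ih (a + 1)]
    omega

theorem pvDict_insert_append {κ ν : Type} [BEq κ] (dict : PySem.Dict κ ν) (key : κ) (v : ν)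
    (h : dict.contains key = false) :
    (dict.insert key v).items = dict.items ++ [(key, v)] := by
  rw [PySem.Dict.insert, if_neg (by simp [h])]

theorem pv_intercalate_nil {α : Type} (L : List (List α)) :
    List.intercalate ([] : List α) L = L.flatten := by
  induction L with
  | nil => rfl
  | cons x L ih =>
    cases L with
    | nil => simp [List.intercalate]
    | cons y L =>
      rw [List.flatten_cons, ← ih]
      simp [List.intercalate]

-- with minimality of k: equality along the sequence is congruence mod p
theorem pv_eq_iff (n d : Int) (k : Nat) (hmin : ∀ m, m < k → ¬ pvP n d m)
    (j : Nat) (hj : j < k) (hjv : pvSeq n d j = pvSeq n d k) :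
    ∀ a c, j ≤ a → (pvSeq n d (a + c) = pvSeq n d a ↔ c % (k - j) = 0) := by
  have hp : 0 < k - j := by omega
  have hinj : ∀ s b : Nat, s < b → b < k → pvSeq n d s ≠ pvSeq n d b := fun s b hsb hbk he =>
    hmin b hbk (Or.inr ⟨s, hsb, he⟩)
  intro a c ha
  constructor
  · intro h
    have r1 := pv_red n d k j hj hjv (a + c) (by omega)
    have r2 := pv_red n d k j hj hjv a ha
    have hmu : (a + c - j) % (k - j) < k - j := Nat.mod_lt _ hp
    have hmv : (a - j) % (k - j) < k - j := Nat.mod_lt _ hp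
    have hu : j + (a + c - j) % (k - j) < k := by omega
    have hv : j + (a - j) % (k - j) < k := by omega
    have heq : pvSeq n d (j + (a + c - j) % (k - j)) = pvSeq n d (j + (a - j) % (k - j)) := by
      rw [← r1, ← r2, h]
    have hidx : (a + c - j) % (k - j) = (a - j) % (k - j) := by
      by_contra hne
      rcases Nat.lt_or_ge ((a + c - j) % (k - j)) ((a - j) % (k - j)) with hlt | hge
      · exact hinj (j + (a + c - j) % (k - j)) (j + (a - j) % (k - j)) (by omega) hv heq
      · exact hinj (j + (a - j) % (k - j)) (j + (a + c - j) % (k - j)) (by omega) hu heq.symm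
    have hmod : (a - j + c) % (k - j) = (a - j + 0) % (k - j) := by
      rw [Nat.add_zero]
      have : a + c - j = a - j + c := by omega
      rw [← this, hidx]
    have := Nat.ModEq.add_left_cancel' (a - j) hmod
    simpa [Nat.ModEq] using this
  · intro h
    obtain ⟨m, hm⟩ := Nat.dvd_of_mod_eq_zero h
    subst hm
    clear h
    induction m with
    | zero => simp
    | succ m ih =>
      have h1 : a + (k - j) * (m + 1) = (a + (k - j) * m) + (k - j) := by ring
      rw [h1, pv_per n d k j hj hjv _ (by omega), ih]

theorem pv_nonzero_all (n d : Int) (k : Nat) (hk : pvP n d k)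
    (hmin : ∀ m, m < k → ¬ pvP n d m) (hz : pvSeq n d k ≠ 0)
    (j : Nat) (hj : j < k) (hjv : pvSeq n d j = pvSeq n d k) :
    ∀ t, pvSeq n d t ≠ 0 := by
  intro t h0
  rcases Nat.lt_or_ge t k with hlt | hge
  · exact hmin t hlt (Or.inl h0)
  · rcases Nat.eq_or_lt_of_le hge with heq | hlt'
    · exact hz (heq ▸ h0)
    · have hr := pv_red n d k j hj hjv t (by omega)
      have hidx : j + (t - j) % (k - j) < k := by
        have := Nat.mod_lt (t - j) (show 0 < k - j by omega)
        omega
      exact hmin _ hidx (Or.inl (hr ▸ h0))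

theorem pvBlam_spec (n d : Int) (hd : d ≠ 0) (k : Nat) (hmin : ∀ m, m < k → ¬ pvP n d m)
    (j : Nat) (hj : j < k) (hjv : pvSeq n d j = pvSeq n d k) (M : Nat) (hjN : j ≤ M) :
    ∀ fuel c, 1 ≤ c → c ≤ k - j → (k - j) - c < fuel →
      pvBlam d (pvSeq n d M) fuel (pvSeq n d (M + c)) (c : Int) = ((k - j : Nat) : Int) := by
  have hp : 0 < k - j := by omega
  intro fuel
  induction fuel with
  | zero => intro c _ _ h; omega
  | succ fuel ih =>
    intro c hc1 hcp hfuel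
    by_cases heq : pvSeq n d (M + c) = pvSeq n d M
    · have hcm : c % (k - j) = 0 :=
        (pv_eq_iff n d k hmin j hj hjv M c hjN).mp heq
      have hcd : (k - j) ∣ c := Nat.dvd_of_mod_eq_zero hcm
      have : k - j ≤ c := Nat.le_of_dvd (by omega) hcd
      have hceq : c = k - j := by omega
      rw [pvBlam, if_pos heq, hceq]
    · have hclt : c < k - j := by
        rcases Nat.eq_or_lt_of_le hcp with hceq | h
        · exfalso
          apply heq
          rw [hceq]
          exact pv_per n d k j hj hjv M hjN
        · omega
      rw [pvBlam, if_neg heq]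
      have hstep : PySem.Int.mod (pvSeq n d (M + c) * 10) d = pvSeq n d (M + (c + 1)) := by
        show pvStep d (pvSeq n d (M + c)) = pvSeq n d (M + c + 1)
        rfl
      have hcast : (c : Int) + 1 = ((c + 1 : Nat) : Int) := by push_cast; ring
      rw [hstep, hcast]
      exact ih (c + 1) (by omega) (by omega) (by omega)

theorem pvBmu_spec (n d : Int) (hd : d ≠ 0) (k : Nat) (hmin : ∀ m, m < k → ¬ pvP n d m)
    (j : Nat) (hj : j < k) (hjv : pvSeq n d j = pvSeq n d k) :
    ∀ fuel i, i ≤ j → j - i < fuel →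
      pvBmu d fuel (pvSeq n d i) (pvSeq n d (i + (k - j))) = pvSeq n d j := by
  have hp : 0 < k - j := by omega
  have hinj : ∀ s b : Nat, s < b → b < k → pvSeq n d s ≠ pvSeq n d b := fun s b hsb hbk he =>
    hmin b hbk (Or.inr ⟨s, hsb, he⟩)
  intro fuel
  induction fuel with
  | zero => intro i _ h; omega
  | succ fuel ih =>
    intro i hij hfuel
    by_cases heq : pvSeq n d i = pvSeq n d (i + (k - j))
    · have hieq : i = j := by
        by_contra hne
        have hilt : i < j := by omega
        exact hinj i (i + (k - j)) (by omega) (by omega) heq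
      rw [pvBmu, if_pos heq, hieq]
    · have hne : i ≠ j := by
        intro hcontra
        apply heq
        rw [hcontra]
        have hk2 : j + (k - j) = k := by omega
        rw [hk2]
        exact hjv
      have hilt : i < j := by omega
      rw [pvBmu, if_neg heq]
      have h1 : PySem.Int.mod (pvSeq n d i * 10) d = pvSeq n d (i + 1) := rfl
      have h2 : PySem.Int.mod (pvSeq n d (i + (k - j)) * 10) d = pvSeq n d (i + 1 + (k - j)) := by
        show pvStep d (pvSeq n d (i + (k - j))) = pvSeq n d (i + 1 + (k - j))
        have : i + 1 + (k - j) = (i + (k - j)) + 1 := by omega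
        rw [this]
        rfl
      rw [h1, h2]
      exact ih (i + 1) (by omega) (by omega)

theorem pvBfl_spec (n d : Int) (istar : Nat) (h1 : 1 ≤ istar)
    (hQ : pvSeq n d istar = pvSeq n d (2 * istar))
    (hQmin : ∀ m, 1 ≤ m → m < istar → pvSeq n d m ≠ pvSeq n d (2 * m)) :
    ∀ fuel i, 1 ≤ i → i ≤ istar → istar - i < fuel →
      pvBfl d fuel (pvSeq n d i) (pvSeq n d (2 * i)) = pvSeq n d istar := by
  intro fuel
  induction fuel with
  | zero => intro i _ _ h; omega
  | succ fuel ih =>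
    intro i hi1 hile hfuel
    by_cases heq : pvSeq n d i = pvSeq n d (2 * i)
    · have hieq : i = istar := by
        by_contra hne
        exact hQmin i hi1 (by omega) heq
      rw [pvBfl, if_pos heq, hieq]
    · have hilt : i < istar := by
        rcases Nat.eq_or_lt_of_le hile with he | h
        · exact absurd (he ▸ hQ) heq
        · omega
      rw [pvBfl, if_neg heq]
      have h1' : PySem.Int.mod (pvSeq n d i * 10) d = pvSeq n d (i + 1) := rfl
      have h2' : PySem.Int.mod ((PySem.Int.mod (pvSeq n d (2 * i) * 10) d) * 10) d
          = pvSeq n d (2 * (i + 1)) := by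
        show pvStep d (pvStep d (pvSeq n d (2 * i))) = pvSeq n d (2 * (i + 1))
        have : 2 * (i + 1) = (2 * i + 1) + 1 := by ring
        rw [this]
        rfl
      rw [h1', h2']
      exact ih (i + 1) (by omega) (by omega) (by omega)

theorem pv_digits_foldl (n d : Int) :
    ∀ (m i : Nat) (acc : List String),
      (List.range m).foldl
        (fun (st : List String × Int) _ =>
          (st.1 ++ [PySem.Int.toStr (PySem.Int.floordiv (st.2 * 10) d)],
           PySem.Int.mod (st.2 * 10) d))
        (acc, pvSeq n d i)
      = (acc ++ (List.range m).map (fun t => PySem.Int.toStr (PySem.Int.floordiv (pvSeq n d (i + t) * 10) d)),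
         pvSeq n d (i + m)) := by
  intro m
  induction m with
  | zero => intro i acc; simp
  | succ m ih =>
    intro i acc
    rw [List.range_succ, List.foldl_append, ih i acc, List.map_append]
    simp only [List.foldl_cons, List.foldl_nil, List.map_cons, List.map_nil, List.append_assoc]
    constructor

theorem pv_find_spec (n d : Int) (k j : Nat) (hj : j < k) (hjv : pvSeq n d j = pvSeq n d k)
    (huniq : ∀ s, s < k → pvSeq n d s = pvSeq n d k → s = j) :
    ∀ a, a ≤ j →
      List.find? (fun p => p.1 == pvSeq n d k)
        ((List.range' a (k - a)).map (fun t => (pvSeq n d t, (t : Int)))) = some (pvSeq n d j, (j : Int)) := by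
  have key : ∀ (m a : Nat), a ≤ j → j - a = m →
      List.find? (fun p => p.1 == pvSeq n d k)
        ((List.range' a (k - a)).map (fun t => (pvSeq n d t, (t : Int)))) = some (pvSeq n d j, (j : Int)) := by
    intro m
    induction m with
    | zero =>
      intro a ha hm
      have haj : a = j := by omega
      subst haj
      have hka : k - a = (k - a - 1) + 1 := by omega
      rw [hka, List.range'_succ]
      simp only [List.map_cons]
      rw [List.find?_cons_of_pos (by simp [hjv])]
    | succ m ih =>
      intro a ha hm
      have halt : a < j := by omega
      have hka : k - a = (k - (a + 1)) + 1 := by omega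
      rw [hka, List.range'_succ]
      simp only [List.map_cons]
      rw [List.find?_cons_of_neg]
      · exact ih (a + 1) (by omega) (by omega)
      · simp only [beq_iff_eq]
        intro hcontra
        have := huniq a (by omega) hcontra
        omega
  intro a ha
  exact key (j - a) a ha rfl

-- A's loop, zero case: returns none
theorem pvAloop_none (n d : Int) (hd : d ≠ 0) (k : Nat) (hmin : ∀ m, m < k → ¬ pvP n d m)
    (hz : pvSeq n d k = 0) :
    ∀ fuel i (rep : String) (dict : PySem.Dict Int Int), i ≤ k → k - i < fuel →
      rep.toList = (List.range i).flatMap (pvDigC n d) →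
      dict.items = ((List.range i).map fun t => (pvSeq n d t, (t : Int))) →
      pvAloop d fuel rep dict (pvSeq n d i) = none := by
  intro fuel
  induction fuel with
  | zero => intro i rep dict _ h; omega
  | succ fuel ih =>
    intro i rep dict hik hfuel hrep hdict
    rcases Nat.eq_or_lt_of_le hik with hieq | hilt
    · subst hieq
      rw [pvAloop, if_neg (fun h => h.1 hz), if_pos hz]
    · have hnz : pvSeq n d i ≠ 0 := fun h0 => hmin i hilt (Or.inl h0)
      have hcont : dict.contains (pvSeq n d i) = false := by
        rw [PySem.Dict.contains, hdict, List.any_eq_false]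
        intro x hx
        obtain ⟨t, ht, rfl⟩ := List.mem_map.mp hx
        simp only [beq_iff_eq]
        intro hcontra
        exact hmin i hilt (Or.inr ⟨t, List.mem_range.mp ht, hcontra⟩)
      rw [pvAloop, if_pos ⟨hnz, hcont⟩]
      show pvAloop d fuel (rep ++ PySem.Int.toStr (PySem.Int.floordiv (pvSeq n d i * 10) d))
          (dict.insert (pvSeq n d i) (PySem.Str.len rep)) (PySem.Int.mod (pvSeq n d i * 10) d) = _
      have hstep : PySem.Int.mod (pvSeq n d i * 10) d = pvSeq n d (i + 1) := rfl
      rw [hstep]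
      apply ih (i + 1) _ _ (by omega) (by omega)
      · simp only [String.toList_append, hrep, PySem.Int.toList_toStr, List.range_succ,
          List.flatMap_append, List.flatMap_cons, List.flatMap_nil, List.append_nil]
        rfl
      · rw [pvDict_insert_append _ _ _ hcont, hdict, List.range_succ, List.map_append]
        simp only [List.map_cons, List.map_nil]
        congr 2
        rw [PySem.Str.len_eq, hrep, List.range_eq_range', pvFlat_len n d hd i 0]

-- A's loop, repeat case: returns the slice from position j
theorem pvAloop_some (n d : Int) (hd : d ≠ 0) (k : Nat) (hk : pvP n d k)
    (hmin : ∀ m, m < k → ¬ pvP n d m) (hz : pvSeq n d k ≠ 0)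
    (j : Nat) (hj : j < k) (hjv : pvSeq n d j = pvSeq n d k)
    (huniq : ∀ s, s < k → pvSeq n d s = pvSeq n d k → s = j) :
    ∀ fuel i (rep : String) (dict : PySem.Dict Int Int), i ≤ k → k - i < fuel →
      rep.toList = (List.range i).flatMap (pvDigC n d) →
      dict.items = ((List.range i).map fun t => (pvSeq n d t, (t : Int))) →
      pvAloop d fuel rep dict (pvSeq n d i)
        = some (String.ofList (PySem.Chars.slice ((List.range k).flatMap (pvDigC n d)) (some (j : Int)) none)) := by
  intro fuel
  induction fuel with
  | zero => intro i rep dict _ h; omega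
  | succ fuel ih =>
    intro i rep dict hik hfuel hrep hdict
    rcases Nat.eq_or_lt_of_le hik with hieq | hilt
    · rw [hieq] at hrep hdict ⊢
      have hcont : dict.contains (pvSeq n d k) = true := by
        simp only [PySem.Dict.contains, hdict, List.any_map, List.any_eq_true]
        exact ⟨j, List.mem_range.mpr hj, by simp [hjv]⟩
      rw [pvAloop, if_neg (fun h => by rw [hcont] at h; exact absurd h.2 (by simp)),
        if_neg hz]
      have hgetD : dict.getD (pvSeq n d k) 0 = (j : Int) := by
        simp only [PySem.Dict.getD, PySem.Dict.get?, hdict, List.range_eq_range']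
        have := pv_find_spec n d k j hj hjv huniq 0 (by omega)
        simp only [Nat.sub_zero] at this
        rw [this]
        rfl
      rw [hgetD]
      show some (PySem.Str.slice rep (some (j : Int)) none) = _
      have : PySem.Str.slice rep (some (j : Int)) none
          = String.ofList (PySem.Chars.slice rep.toList (some (j : Int)) none) := rfl
      rw [this, hrep]
    · have hnz : pvSeq n d i ≠ 0 := fun h0 => hmin i hilt (Or.inl h0)
      have hcont : dict.contains (pvSeq n d i) = false := by
        rw [PySem.Dict.contains, hdict, List.any_eq_false]
        intro x hx
        obtain ⟨t, ht, rfl⟩ := List.mem_map.mp hx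
        simp only [beq_iff_eq]
        intro hcontra
        exact hmin i hilt (Or.inr ⟨t, List.mem_range.mp ht, hcontra⟩)
      rw [pvAloop, if_pos ⟨hnz, hcont⟩]
      show pvAloop d fuel (rep ++ PySem.Int.toStr (PySem.Int.floordiv (pvSeq n d i * 10) d))
          (dict.insert (pvSeq n d i) (PySem.Str.len rep)) (PySem.Int.mod (pvSeq n d i * 10) d) = _
      have hstep : PySem.Int.mod (pvSeq n d i * 10) d = pvSeq n d (i + 1) := rfl
      rw [hstep]
      apply ih (i + 1) _ _ (by omega) (by omega)
      · simp only [String.toList_append, hrep, PySem.Int.toList_toStr, List.range_succ,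
          List.flatMap_append, List.flatMap_cons, List.flatMap_nil, List.append_nil]
        rfl
      · rw [pvDict_insert_append _ _ _ hcont, hdict, List.range_succ, List.map_append]
        simp only [List.map_cons, List.map_nil]
        congr 2
        rw [PySem.Str.len_eq, hrep, List.range_eq_range', pvFlat_len n d hd i 0]


-- ===== VERDICT (by name: the statement is the Claim_ definition above) =====
theorem get_recurring_decimal_cycle_spec : Claim_equal_get_recurring_decimal_cycle := by
  intro n d _ hd
  replace hd : d ≠ 0 := hd
  unfold Spec_get_recurring_decimal_cycle
  obtain ⟨k, hk, hmin⟩ := pv_exists_least (pvP_exists n d hd)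
  have hkN := pv_k_lt n d hd k hk hmin
  set N := d.natAbs with hN
  simp only [get_recurring_decimal_cycle, get_recurring_decimal_cycle_alt]
  by_cases hz : pvSeq n d k = 0
  · -- terminating decimal: the hare and tortoise meet at remainder 0
    obtain ⟨istar, hQi, hQmin'⟩ := pv_exists_least
      (⟨k + 1, by omega, by
        rw [pvSeq_zero_after n d k hz (k + 1) (by omega),
          pvSeq_zero_after n d k hz (2 * (k + 1)) (by omega)]⟩ :
        ∃ i, 1 ≤ i ∧ pvSeq n d i = pvSeq n d (2 * i))
    have hQmin : ∀ m, 1 ≤ m → m < istar → pvSeq n d m ≠ pvSeq n d (2 * m) :=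
      fun m h1 hlt he => hQmin' m hlt ⟨h1, he⟩
    have histk : istar ≤ k + 1 := by
      by_contra hgt
      exact hQmin' (k + 1) (by omega) ⟨by omega, by
        rw [pvSeq_zero_after n d k hz (k + 1) (by omega),
          pvSeq_zero_after n d k hz (2 * (k + 1)) (by omega)]⟩
    have hz_at : pvSeq n d istar = 0 := by
      rcases Nat.lt_or_ge istar k with hlt | hge
      · exfalso
        have hnz : pvSeq n d istar ≠ 0 := fun h0 => hmin istar hlt (Or.inl h0)
        rcases Nat.lt_or_ge (2 * istar) k with h2lt | h2ge
        · exact hmin (2 * istar) h2lt (Or.inr ⟨istar, by omega, hQi.2⟩)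
        · exact hnz (hQi.2.trans (pvSeq_zero_after n d k hz (2 * istar) h2ge))
      · exact pvSeq_zero_after n d k hz istar hge
    have hfl : pvBfl d d.natAbs (PySem.Int.mod (PySem.Int.mod n d * 10) d)
        (PySem.Int.mod (PySem.Int.mod (PySem.Int.mod n d * 10) d * 10) d) = pvSeq n d istar :=
      pvBfl_spec n d istar hQi.1 hQi.2 hQmin d.natAbs 1 (by omega) (by omega) (by omega)
    rw [hfl, if_pos hz_at]
    exact pvAloop_none n d hd k hmin hz (N + 1) 0 "" PySem.Dict.empty (by omega) (by omega)
      (by simp) (by simp [PySem.Dict.empty])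
  · -- recurring decimal
    obtain ⟨j, hj, hjv'⟩ := hk.resolve_left hz
    have hjv : pvSeq n d j = pvSeq n d k := hjv'
    have hinj : ∀ a b : Nat, a < b → b < k → pvSeq n d a ≠ pvSeq n d b := fun a b hab hbk he =>
      hmin b hbk (Or.inr ⟨a, hab, he⟩)
    have huniq : ∀ s, s < k → pvSeq n d s = pvSeq n d k → s = j := by
      intro s hs' hsv
      by_contra hne
      have heq : pvSeq n d s = pvSeq n d j := by rw [hsv, hjv]
      rcases Nat.lt_or_ge s j with hlt | hge
      · exact hmin j (by omega) (Or.inr ⟨s, hlt, heq⟩)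
      · exact hmin s hs' (Or.inr ⟨j, by omega, heq.symm⟩)
    have hnzall := pv_nonzero_all n d k (Or.inr ⟨j, hj, hjv⟩) hmin hz j hj hjv
    set p := k - j with hp
    have hp0 : 0 < p := by omega
    -- the first multiple of the period p past the tail j: a meeting point exists
    have hjdm := Nat.div_add_mod j p
    have hjmod : j % p < p := Nat.mod_lt _ hp0
    have hQw : pvSeq n d (p * (j / p) + p) = pvSeq n d (2 * (p * (j / p) + p)) := by
      have hqj : j ≤ p * (j / p) + p := by omega
      have hqd : (p * (j / p) + p) % p = 0 := by
        have : p * (j / p) + p = p * (j / p + 1) := by ring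
        rw [this, Nat.mul_mod_right]
      have := (pv_eq_iff n d k hmin j hj hjv (p * (j / p) + p) (p * (j / p) + p) hqj).mpr hqd
      have h2q : 2 * (p * (j / p) + p) = (p * (j / p) + p) + (p * (j / p) + p) := by ring
      rw [h2q]
      exact this.symm
    obtain ⟨istar, hQi, hQmin'⟩ := pv_exists_least
      (⟨p * (j / p) + p, by omega, hQw⟩ : ∃ i, 1 ≤ i ∧ pvSeq n d i = pvSeq n d (2 * i))
    have hQmin : ∀ m, 1 ≤ m → m < istar → pvSeq n d m ≠ pvSeq n d (2 * m) :=
      fun m h1 hlt he => hQmin' m hlt ⟨h1, he⟩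
    have histk : istar ≤ k := by
      have hqk : p * (j / p) + p ≤ k := by omega
      by_contra hgt
      exact hQmin' (p * (j / p) + p) (by omega) ⟨by omega, hQw⟩
    have hjistar : j ≤ istar := by
      by_contra hlt
      have h1i : 1 ≤ istar := hQi.1
      rcases Nat.lt_or_ge (2 * istar) k with h2lt | h2ge
      · exact hinj istar (2 * istar) (by omega) h2lt hQi.2
      · have hred := pv_red n d k j hj hjv (2 * istar) (by omega)
        have hv : j + (2 * istar - j) % p < k := by
          have := Nat.mod_lt (2 * istar - j) hp0
          omega
        exact hinj istar (j + (2 * istar - j) % p) (by omega) hv (hQi.2.trans hred)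
    have hfl : pvBfl d d.natAbs (PySem.Int.mod (PySem.Int.mod n d * 10) d)
        (PySem.Int.mod (PySem.Int.mod (PySem.Int.mod n d * 10) d * 10) d) = pvSeq n d istar :=
      pvBfl_spec n d istar hQi.1 hQi.2 hQmin d.natAbs 1 (by omega) (by omega) (by omega)
    have hsz : pvSeq n d istar ≠ 0 := hnzall istar
    rw [hfl, if_neg hsz]
    have hstep1 : PySem.Int.mod (pvSeq n d istar * 10) d = pvSeq n d (istar + 1) := rfl
    have hlam : pvBlam d (pvSeq n d istar) N (PySem.Int.mod (pvSeq n d istar * 10) d) 1 = (p : Int) := by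
      rw [hstep1]
      have := pvBlam_spec n d hd k hmin j hj hjv istar hjistar N 1 (by omega) (by omega) (by omega)
      simpa using this
    rw [hlam]
    have htn : ((p : Int)).toNat = p := Int.toNat_natCast p
    rw [htn]
    have hb0 : (List.range p).foldl (fun r _ => PySem.Int.mod (r * 10) d) (PySem.Int.mod n d)
        = pvSeq n d p := by
      have := pv_foldl n d p 0
      simpa using this
    rw [hb0]
    have hbmu : pvBmu d N (PySem.Int.mod n d) (pvSeq n d p) = pvSeq n d j := by
      have := pvBmu_spec n d hd k hmin j hj hjv N 0 (by omega) (by omega)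
      simpa using this
    rw [hbmu]
    have hdig := pv_digits_foldl n d p j []
    rw [hdig]
    simp only [List.nil_append]
    -- both sides are explicit strings now; compare their character lists
    have hA : pvAloop d (d.natAbs + 1) "" PySem.Dict.empty (PySem.Int.mod n d)
        = some (String.ofList (PySem.Chars.slice ((List.range k).flatMap (pvDigC n d)) (some (j : Int)) none)) :=
      pvAloop_some n d hd k (Or.inr ⟨j, hj, hjv⟩) hmin hz j hj hjv huniq (N + 1) 0 ""
        PySem.Dict.empty (by omega) (by omega) (by simp) (by simp [PySem.Dict.empty])
    rw [hA]
    congr 1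
    -- A's slice of the digit string vs B's join of the cycle digits
    have hsliceL : PySem.Chars.slice ((List.range k).flatMap (pvDigC n d)) (some (j : Int)) none
        = ((List.range k).flatMap (pvDigC n d)).drop j := by
      simp [PySem.Chars.slice]
    have hsplit : List.range k = List.range' 0 j ++ List.range' j p := by
      rw [List.range_eq_range', show k = j + p from by omega, ← List.range'_append]
      simp
    have hdrop : ((List.range k).flatMap (pvDigC n d)).drop j = (List.range' j p).flatMap (pvDigC n d) := by
      rw [hsplit, List.flatMap_append]
      have hlen : ((List.range' 0 j).flatMap (pvDigC n d)).length = j := pvFlat_len n d hd j 0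
      exact List.drop_left' hlen
    have hjoin : PySem.Str.join ""
        ((List.range p).map fun t => PySem.Int.toStr (PySem.Int.floordiv (pvSeq n d (j + t) * 10) d))
        = String.ofList ((List.range' j p).flatMap (pvDigC n d)) := by
      rw [PySem.Str.join]
      congr 1
      rw [PySem.Chars.join]
      have : (String.toList "") = ([] : List Char) := rfl
      rw [this, pv_intercalate_nil]
      rw [List.map_map]
      have hmapeq : (List.map (String.toList ∘ fun t => PySem.Int.toStr (PySem.Int.floordiv (pvSeq n d (j + t) * 10) d)) (List.range p))
          = List.map (fun t => pvDigC n d (j + t)) (List.range p) := by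
        apply List.map_congr_left
        intro t _
        simp only [Function.comp_apply, PySem.Int.toList_toStr]
        rfl
      rw [hmapeq]
      rw [List.range'_eq_map_range, List.flatMap_map]
      rw [List.flatten_eq_flatMap]
      simp [List.flatMap_map]
    rw [hjoin, hsliceL, hdrop]
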